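-- pv_equiv track=rewrite | github.com/Creekyu/sklearn1 | work/Cluster.py | sort_area
-- ===== SOURCE A (Python) =====
-- def sort_area(data, area):
--     total = [data, area]
--     sort_1 = [[], []]
--     sort_2 = [[], []]
--     sort_3 = [[], []]
--     sort_4 = [[], []]
--     sort_5 = [[], []]
--     # 按分类分别放进sort_1,sort_2,sort_3,sort_4,sort_5
--     # 分几类就用到几个
--     for i, j in zip(data, area):
--         if (i == 0):
--             sort_1[0].append(i)
--             sort_1[1].append(j)
--         if (i == 1):
--             sort_2[0].append(i)
--             sort_2[1].append(j)
--         if (i == 2):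
--             sort_3[0].append(i)
--             sort_3[1].append(j)
--         if (i == 3):
--             sort_4[0].append(i)
--             sort_4[1].append(j)
--         if (i == 4):
--             sort_5[0].append(i)
--             sort_5[1].append(j)
--     return [sort_1, sort_2, sort_3, sort_4, sort_5]
-- ===== SOURCE B (Python) =====
-- def sort_area(data, area):
--     pairs = list(zip(data, area))
--     return [[[i for i, j in pairs if i == c], [j for i, j in pairs if i == c]]
--             for c in range(5)]
-- ===== Notes on version B (the rewrite author's own statement) =====
-- stated objective: simpler
-- what changed: Replaces A's single pass carrying five accumulator pairs with a comprehension over the five categories, each bucket built by filtering the zipped pairs for that category.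
import Mathlib
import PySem

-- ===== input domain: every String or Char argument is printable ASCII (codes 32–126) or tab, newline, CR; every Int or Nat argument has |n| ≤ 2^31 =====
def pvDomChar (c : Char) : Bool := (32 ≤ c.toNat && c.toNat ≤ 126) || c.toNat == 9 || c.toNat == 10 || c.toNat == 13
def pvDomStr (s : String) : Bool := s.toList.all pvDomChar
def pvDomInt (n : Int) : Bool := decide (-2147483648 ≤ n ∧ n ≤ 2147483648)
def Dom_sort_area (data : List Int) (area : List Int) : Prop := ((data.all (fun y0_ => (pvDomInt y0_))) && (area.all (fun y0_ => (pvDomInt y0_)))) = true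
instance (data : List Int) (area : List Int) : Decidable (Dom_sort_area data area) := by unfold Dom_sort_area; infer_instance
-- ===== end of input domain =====

-- B replaces A's single pass with five accumulator pairs by one filter of the zipped pairs per category (objective: simpler).


-- ===== PORT A =====
-- the for-loop over zip(data, area), threading the five (labels, areas) accumulator pairs
def sortAreaLoop (l : List (Int × Int))
    (s1 s2 s3 s4 s5 : List Int × List Int) : List (List (List Int)) :=
  match l with
  | [] => [[s1.1, s1.2], [s2.1, s2.2], [s3.1, s3.2], [s4.1, s4.2], [s5.1, s5.2]]
  | (i, j) :: rest =>
    let s1 := if i == 0 then (s1.1 ++ [i], s1.2 ++ [j]) else s1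
    let s2 := if i == 1 then (s2.1 ++ [i], s2.2 ++ [j]) else s2
    let s3 := if i == 2 then (s3.1 ++ [i], s3.2 ++ [j]) else s3
    let s4 := if i == 3 then (s4.1 ++ [i], s4.2 ++ [j]) else s4
    let s5 := if i == 4 then (s5.1 ++ [i], s5.2 ++ [j]) else s5
    sortAreaLoop rest s1 s2 s3 s4 s5

def sort_area (data : List Int) (area : List Int) : List (List (List Int)) :=
  sortAreaLoop (data.zip area) ([], []) ([], []) ([], []) ([], []) ([], [])

-- ===== PORT B =====
-- bucket for one category c: the two comprehensions filtering the materialized pairs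
def sortAreaBucket (pairs : List (Int × Int)) (c : Int) : List (List Int) :=
  [(pairs.filter (fun p => p.1 == c)).map Prod.fst,
   (pairs.filter (fun p => p.1 == c)).map Prod.snd]

def sort_area_alt (data : List Int) (area : List Int) : List (List (List Int)) :=
  let pairs := data.zip area
  (PySem.List.pyRange 0 5 1).map (fun c => sortAreaBucket pairs c)

-- ===== PRECONDITION & SPEC =====
def Spec_sort_area (data : List Int) (area : List Int) (out : List (List (List Int))) : Prop := out = sort_area_alt data area
instance (data : List Int) (area : List Int) (out : List (List (List Int))) : Decidable (Spec_sort_area data area out) := by unfold Spec_sort_area; infer_instance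

-- ===== CLAIM (what is proved, stated in full; the proofs are below) =====
def Claim_equal_sort_area : Prop := ∀ (data : List Int) (area : List Int), Dom_sort_area data area → Spec_sort_area data area (sort_area data area)

-- ===== LEMMAS AND PROOFS =====

-- invariant: the loop ends with each accumulator extended by the filtered tail
theorem bucket_step_fst (i j c : Int) (rest : List (Int × Int)) (s : List Int × List Int) :
    (if i == c then (s.1 ++ [i], s.2 ++ [j]) else s).1 ++ (sortAreaBucket rest c)[0]! =
      s.1 ++ (sortAreaBucket ((i, j) :: rest) c)[0]! := by
  simp only [sortAreaBucket, List.filter_cons]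
  by_cases h : i = c <;> simp [h]

theorem bucket_step_snd (i j c : Int) (rest : List (Int × Int)) (s : List Int × List Int) :
    (if i == c then (s.1 ++ [i], s.2 ++ [j]) else s).2 ++ (sortAreaBucket rest c)[1]! =
      s.2 ++ (sortAreaBucket ((i, j) :: rest) c)[1]! := by
  simp only [sortAreaBucket, List.filter_cons]
  by_cases h : i = c <;> simp [h]

theorem sortAreaLoop_eq (l : List (Int × Int))
    (s1 s2 s3 s4 s5 : List Int × List Int) :
    sortAreaLoop l s1 s2 s3 s4 s5 =
      [[s1.1 ++ (sortAreaBucket l 0)[0]!, s1.2 ++ (sortAreaBucket l 0)[1]!],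
       [s2.1 ++ (sortAreaBucket l 1)[0]!, s2.2 ++ (sortAreaBucket l 1)[1]!],
       [s3.1 ++ (sortAreaBucket l 2)[0]!, s3.2 ++ (sortAreaBucket l 2)[1]!],
       [s4.1 ++ (sortAreaBucket l 3)[0]!, s4.2 ++ (sortAreaBucket l 3)[1]!],
       [s5.1 ++ (sortAreaBucket l 4)[0]!, s5.2 ++ (sortAreaBucket l 4)[1]!]] := by
  induction l generalizing s1 s2 s3 s4 s5 with
  | nil => simp [sortAreaLoop, sortAreaBucket]
  | cons p rest ih =>
    obtain ⟨i, j⟩ := p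
    simp only [sortAreaLoop, ih]
    simp only [bucket_step_fst, bucket_step_snd]

theorem pyRange_five : PySem.List.pyRange 0 5 1 = [0, 1, 2, 3, 4] := by decide

theorem sort_area_spec : Claim_equal_sort_area := by
  intro data area _
  unfold Spec_sort_area sort_area sort_area_alt
  rw [sortAreaLoop_eq, pyRange_five]
  simp only [sortAreaBucket, List.map, List.getElem!_cons_zero, List.getElem!_cons_succ, List.nil_append]
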